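-- pv_equiv track=rewrite | github.com/miexink/Dataflow-Analyses | rd.py | collect_defs
-- ===== SOURCE A (Python) =====
-- def collect_defs(blocks):
--     all_defs = set()
--     gen = {bname: set() for bname in blocks}
--     kill = {bname: set() for bname in blocks}
--     defs_by_var = {}
--
--     for bname, instrs in blocks.items():
--         for i, ins in enumerate(instrs):
--             dest = ins.get("dest")
--             if dest:
--                 d = f"{bname}:{dest}@{i}"
--                 gen[bname].add(d)
--                 all_defs.add(d)
--                 defs_by_var.setdefault(dest, set()).add(d)
--
--     for bname, instrs in blocks.items():
--         defined_vars = {ins.get("dest") for ins in instrs if ins.get("dest")}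
--         k = set()
--         for v in defined_vars:
--             k |= (defs_by_var.get(v, set()) - gen[bname])
--         kill[bname] = k
--
--     return gen, kill, all_defs
-- ===== SOURCE B (Python) =====
-- def collect_defs(blocks):
--     triples = [(ins["dest"], b, f"{b}:{ins['dest']}@{i}")
--                for b, instrs in blocks.items()
--                for i, ins in enumerate(instrs) if ins.get("dest")]
--     gen = {b: {d for _, o, d in triples if o == b} for b in blocks}
--     all_defs = {d for _, _, d in triples}
--     kill = {b: {d for v in {v for v, o, _ in triples if o == b}
--                 for v2, _, d in triples if v2 == v and d not in gen[b]}
--             for b in blocks}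
--     return gen, kill, all_defs
-- ===== Notes on version B (the rewrite author's own statement) =====
-- stated objective: simpler
-- what changed: B drops A's mutable gen/kill dict initialisation, the incremental defs_by_var index and the per-block union-minus-gen set algebra: it builds one flat (variable, origin, definition) triple list in a single comprehension and derives gen, all_defs and kill directly from it, computing each kill set by rescanning the triple list per defined variable instead of looking up an index and subtracting gen.
import Mathlib
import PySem

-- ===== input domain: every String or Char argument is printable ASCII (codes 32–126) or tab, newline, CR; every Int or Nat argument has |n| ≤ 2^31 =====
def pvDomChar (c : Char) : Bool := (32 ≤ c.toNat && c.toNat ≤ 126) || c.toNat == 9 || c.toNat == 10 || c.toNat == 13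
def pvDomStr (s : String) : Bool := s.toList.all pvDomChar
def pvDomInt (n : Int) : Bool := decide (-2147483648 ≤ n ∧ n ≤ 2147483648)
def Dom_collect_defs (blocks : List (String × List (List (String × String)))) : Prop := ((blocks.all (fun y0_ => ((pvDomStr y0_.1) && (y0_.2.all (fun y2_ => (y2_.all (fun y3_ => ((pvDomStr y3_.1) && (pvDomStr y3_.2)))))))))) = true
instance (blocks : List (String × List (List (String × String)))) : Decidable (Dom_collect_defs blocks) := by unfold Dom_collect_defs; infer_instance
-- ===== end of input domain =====

-- B replaces A's mutable dicts and var→defs index by one flat (var, origin, def) triple list from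
-- which gen / kill / all_defs are derived by filtered comprehensions (objective: simpler).


-- ===== PORT A =====
-- `dest = ins.get("dest")` followed by the truthiness test `if dest:` (None and "" are falsy)
def pvDest (ins : List (String × String)) : Option String :=
  match PySem.Dict.get? (PySem.Dict.mk ins) "dest" with
  | some dest => if dest ≠ "" then some dest else none
  | none => none
-- d = f"{bname}:{dest}@{i}"
def pvMkDef (b v : String) (i : Int) : String := b ++ ":" ++ v ++ "@" ++ PySem.Int.toStr i
def collect_defs (blocks : List (String × List (List (String × String)))) : (List (String × List String)) × (List (String × List String)) × List String :=
  -- gen = kill = {bname: set() for bname in blocks}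
  let gen0 : PySem.Dict String (PySem.Set String) :=
    blocks.foldl (fun d p => d.insert p.1 PySem.Set.empty) PySem.Dict.empty
  let kill0 : PySem.Dict String (PySem.Set String) :=
    blocks.foldl (fun d p => d.insert p.1 PySem.Set.empty) PySem.Dict.empty
  -- first loop; gen[bname] always exists here (initialised from the same keys), so `modify` is exact
  let st :=
    blocks.foldl (fun st bp =>
      (PySem.List.enumerate bp.2).foldl
        (fun (st : PySem.Dict String (PySem.Set String) × PySem.Set String × PySem.Dict String (PySem.Set String)) ii =>
          match pvDest ii.2 with
          | some dest =>
              (st.1.modify bp.1 PySem.Set.empty (fun s => s.add (pvMkDef bp.1 dest ii.1)),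
               st.2.1.add (pvMkDef bp.1 dest ii.1),
               st.2.2.modify dest PySem.Set.empty (fun s => s.add (pvMkDef bp.1 dest ii.1)))
          | none => st)
        st)
      (gen0, PySem.Set.empty, PySem.Dict.empty)
  let gen := st.1
  let all_defs := st.2.1
  let defs_by_var := st.2.2
  -- second loop; gen[bname] / defs_by_var.get(v, set()) are getD lookups (the key is always present for gen)
  let kill :=
    blocks.foldl (fun kd bp =>
      let defined_vars : PySem.Set String := PySem.Set.ofList (bp.2.filterMap pvDest)
      let k := defined_vars.foldl (fun k v =>
          PySem.Set.union k
            (PySem.Set.diff (defs_by_var.getD v PySem.Set.empty) (gen.getD bp.1 PySem.Set.empty)))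
        PySem.Set.empty
      kd.insert bp.1 k) kill0
  (gen.items, kill.items, all_defs)

-- ===== PORT B =====
def collect_defs_alt (blocks : List (String × List (List (String × String)))) : (List (String × List String)) × (List (String × List String)) × List String :=
  -- triples = [(dest, b, f"{b}:{dest}@{i}") for b, instrs in blocks.items() for i, ins in enumerate(instrs) if ins.get("dest")]
  let triples : List (String × String × String) :=
    blocks.flatMap (fun bp => (PySem.List.enumerate bp.2).filterMap
      (fun ii => (pvDest ii.2).map (fun v => (v, bp.1, pvMkDef bp.1 v ii.1))))
  -- gen = {b: {d for _, o, d in triples if o == b} for b in blocks}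
  let gen : PySem.Dict String (PySem.Set String) :=
    blocks.foldl (fun d bp => d.insert bp.1
      (PySem.Set.ofList ((triples.filter (fun t => t.2.1 == bp.1)).map (fun t => t.2.2)))) PySem.Dict.empty
  -- all_defs = {d for _, _, d in triples}
  let all_defs : PySem.Set String := PySem.Set.ofList (triples.map (fun t => t.2.2))
  -- kill = {b: {d for v in {v for v, o, _ in triples if o == b} for v2, _, d in triples if v2 == v and d not in gen[b]} for b in blocks}
  let kill : PySem.Dict String (PySem.Set String) :=
    blocks.foldl (fun d bp => d.insert bp.1
      (PySem.Set.ofList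
        ((PySem.Set.ofList ((triples.filter (fun t => t.2.1 == bp.1)).map (fun t => t.1))).flatMap
          (fun v => (triples.filter (fun t => t.1 == v &&
              !(PySem.Set.contains (gen.getD bp.1 PySem.Set.empty) t.2.2))).map (fun t => t.2.2)))))
      PySem.Dict.empty
  (gen.items, kill.items, all_defs)

-- ===== PRECONDITION & SPEC =====
-- Pre_ excludes association lists with a duplicate block name: a Python dict cannot contain a
-- duplicate key, so such lists correspond to no Python input of A at all.
def Pre_collect_defs (blocks : List (String × List (List (String × String)))) : Prop :=
  (blocks.map Prod.fst).Nodup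
instance (blocks : List (String × List (List (String × String)))) : Decidable (Pre_collect_defs blocks) := by unfold Pre_collect_defs; infer_instance

def pvWitness_collect_defs : (List (String × List (List (String × String)))) :=
  [("b1", [[("dest", "x")], [("op", "nop")]]), ("b2", [[("dest", "x")]])]

def Spec_collect_defs (blocks : List (String × List (List (String × String)))) (out : (List (String × List String)) × (List (String × List String)) × List String) : Prop := out = collect_defs_alt blocks
instance (blocks : List (String × List (List (String × String)))) (out : (List (String × List String)) × (List (String × List String)) × List String) : Decidable (Spec_collect_defs blocks out) := by unfold Spec_collect_defs; infer_instance

-- ===== CLAIM (what is proved, stated in full; the proofs are below) =====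
def Claim_equal_collect_defs : Prop := ∀ (blocks : List (String × List (List (String × String)))), Dom_collect_defs blocks → Pre_collect_defs blocks → Spec_collect_defs blocks (collect_defs blocks)

-- ===== LEMMAS AND PROOFS =====

-- the (var, def) pairs of one block, in instruction order
def pvDefsOf (b : String) (instrs : List (List (String × String))) : List (String × String) :=
  (PySem.List.enumerate instrs).filterMap (fun ii => (pvDest ii.2).map (fun v => (v, pvMkDef b v ii.1)))

-- the componentwise shape of A's first-pass step
def pvStepGen (b : String) (g : PySem.Dict String (PySem.Set String)) (ii : Int × List (String × String)) : PySem.Dict String (PySem.Set String) :=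
  match pvDest ii.2 with
  | some dest => g.modify b PySem.Set.empty (fun s => s.add (pvMkDef b dest ii.1))
  | none => g
def pvStepAll (b : String) (s : PySem.Set String) (ii : Int × List (String × String)) : PySem.Set String :=
  match pvDest ii.2 with
  | some dest => s.add (pvMkDef b dest ii.1)
  | none => s
def pvStepDbv (b : String) (d : PySem.Dict String (PySem.Set String)) (ii : Int × List (String × String)) : PySem.Dict String (PySem.Set String) :=
  match pvDest ii.2 with
  | some dest => d.modify dest PySem.Set.empty (fun s => s.add (pvMkDef b dest ii.1))
  | none => d

theorem pv_pass1_split (blocks : List (String × List (List (String × String))))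
    (g0 : PySem.Dict String (PySem.Set String)) (a0 : PySem.Set String) (d0 : PySem.Dict String (PySem.Set String)) :
    blocks.foldl (fun st bp =>
      (PySem.List.enumerate bp.2).foldl
        (fun (st : PySem.Dict String (PySem.Set String) × PySem.Set String × PySem.Dict String (PySem.Set String)) ii =>
          match pvDest ii.2 with
          | some dest =>
              (st.1.modify bp.1 PySem.Set.empty (fun s => s.add (pvMkDef bp.1 dest ii.1)),
               st.2.1.add (pvMkDef bp.1 dest ii.1),
               st.2.2.modify dest PySem.Set.empty (fun s => s.add (pvMkDef bp.1 dest ii.1)))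
          | none => st)
        st) (g0, a0, d0)
    = (blocks.foldl (fun g bp => (PySem.List.enumerate bp.2).foldl (pvStepGen bp.1) g) g0,
       blocks.foldl (fun s bp => (PySem.List.enumerate bp.2).foldl (pvStepAll bp.1) s) a0,
       blocks.foldl (fun d bp => (PySem.List.enumerate bp.2).foldl (pvStepDbv bp.1) d) d0) := by
  induction blocks generalizing g0 a0 d0 with
  | nil => rfl
  | cons p bs ih =>
      simp only [List.foldl_cons]
      have hfun : (fun (st : PySem.Dict String (PySem.Set String) × PySem.Set String × PySem.Dict String (PySem.Set String)) (ii : Int × List (String × String)) =>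
          match pvDest ii.2 with
          | some dest =>
              (st.1.modify p.1 PySem.Set.empty (fun s => s.add (pvMkDef p.1 dest ii.1)),
               st.2.1.add (pvMkDef p.1 dest ii.1),
               st.2.2.modify dest PySem.Set.empty (fun s => s.add (pvMkDef p.1 dest ii.1)))
          | none => st)
          = (fun st ii => (pvStepGen p.1 st.1 ii,
              (fun (s2 : PySem.Set String × PySem.Dict String (PySem.Set String)) ii => (pvStepAll p.1 s2.1 ii, pvStepDbv p.1 s2.2 ii)) st.2 ii)) := by
        funext st ii
        simp only [pvStepGen, pvStepAll, pvStepDbv]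
        cases pvDest ii.2 <;> rfl
      rw [hfun,
        PySem.List.foldl_prod_mk (f := fun g ii => pvStepGen p.1 g ii)
          (g := fun (s2 : PySem.Set String × PySem.Dict String (PySem.Set String)) ii => (pvStepAll p.1 s2.1 ii, pvStepDbv p.1 s2.2 ii)),
        PySem.List.foldl_prod_mk (f := fun s ii => pvStepAll p.1 s ii) (g := fun d ii => pvStepDbv p.1 d ii),
        ih]

theorem pv_stepGen_eq (b : String) (instrs : List (List (String × String))) (s0 : Int) (g : PySem.Dict String (PySem.Set String)) :
    (PySem.List.enumerate instrs s0).foldl (pvStepGen b) g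
      = ((PySem.List.enumerate instrs s0).filterMap (fun ii => (pvDest ii.2).map (fun v => (v, pvMkDef b v ii.1)))).foldl
          (fun g vd => g.modify b PySem.Set.empty (fun s => s.add vd.2)) g := by
  induction instrs generalizing s0 g with
  | nil => simp [PySem.List.enumerate_nil]
  | cons x xs ih =>
      rw [PySem.List.enumerate_cons]
      simp only [List.foldl_cons, List.filterMap_cons]
      cases h : pvDest x <;> simp [pvStepGen, h, ih]

theorem pv_stepAll_eq (b : String) (instrs : List (List (String × String))) (s0 : Int) (s : PySem.Set String) :
    (PySem.List.enumerate instrs s0).foldl (pvStepAll b) s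
      = ((PySem.List.enumerate instrs s0).filterMap (fun ii => (pvDest ii.2).map (fun v => (v, pvMkDef b v ii.1)))).foldl
          (fun s vd => s.add vd.2) s := by
  induction instrs generalizing s0 s with
  | nil => simp [PySem.List.enumerate_nil]
  | cons x xs ih =>
      rw [PySem.List.enumerate_cons]
      simp only [List.foldl_cons, List.filterMap_cons]
      cases h : pvDest x <;> simp [pvStepAll, h, ih]

theorem pv_stepDbv_eq (b : String) (instrs : List (List (String × String))) (s0 : Int) (d : PySem.Dict String (PySem.Set String)) :
    (PySem.List.enumerate instrs s0).foldl (pvStepDbv b) d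
      = ((PySem.List.enumerate instrs s0).filterMap (fun ii => (pvDest ii.2).map (fun v => (v, pvMkDef b v ii.1)))).foldl
          (fun d vd => d.modify vd.1 PySem.Set.empty (fun s => s.add vd.2)) d := by
  induction instrs generalizing s0 d with
  | nil => simp [PySem.List.enumerate_nil]
  | cons x xs ih =>
      rw [PySem.List.enumerate_cons]
      simp only [List.foldl_cons, List.filterMap_cons]
      cases h : pvDest x <;> simp [pvStepDbv, h, ih]

-- ===== dict pointwise lemmas =====
theorem pv_getD_foldl_insert_ne {ν β : Type} (l : List β) (key : β → String) (v : β → ν)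
    (d : PySem.Dict String ν) (k : String) (d0 : ν) (h : ∀ a ∈ l, key a ≠ k) :
    (l.foldl (fun d a => d.insert (key a) (v a)) d).getD k d0 = d.getD k d0 := by
  induction l generalizing d with
  | nil => rfl
  | cons a t ih =>
      simp only [List.foldl_cons]
      rw [ih _ (fun x hx => h x (List.mem_cons_of_mem _ hx)),
        PySem.Dict.getD_insert, if_neg (fun hk => h a List.mem_cons_self hk.symm)]

theorem pv_getD_foldl_insert_indep {ν β : Type} (l : List β) (key : β → String) (v : β → ν)
    (d : PySem.Dict String ν) (p : β) (d0 : ν) (hnd : (l.map key).Nodup) (hp : p ∈ l) :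
    (l.foldl (fun d a => d.insert (key a) (v a)) d).getD (key p) d0 = v p := by
  induction l generalizing d with
  | nil => cases hp
  | cons a t ih =>
      simp only [List.map_cons, List.nodup_cons] at hnd
      simp only [List.foldl_cons]
      rcases List.mem_cons.mp hp with rfl | hpt
      · rw [pv_getD_foldl_insert_ne _ key v _ _ _
          (fun x hx hk => hnd.1 (by rw [← hk]; exact List.mem_map_of_mem hx)),
          PySem.Dict.getD_insert, if_pos rfl]
      · exact ih _ hnd.2 hpt

theorem pv_getD_foldl_modify_ne {ν β : Type} (l : List β) (b : String) (d0 : ν) (f : ν → β → ν)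
    (d : PySem.Dict String ν) (k : String) (hk : k ≠ b) :
    (l.foldl (fun g x => g.modify b d0 (fun s => f s x)) d).getD k d0 = d.getD k d0 := by
  induction l generalizing d with
  | nil => rfl
  | cons a t ih =>
      simp only [List.foldl_cons]
      rw [ih, PySem.Dict.getD_modify, if_neg hk]

theorem pv_getD_foldl_modify_self {ν β : Type} (l : List β) (b : String) (d0 : ν) (f : ν → β → ν)
    (d : PySem.Dict String ν) :
    (l.foldl (fun g x => g.modify b d0 (fun s => f s x)) d).getD b d0 = l.foldl f (d.getD b d0) := by
  induction l generalizing d with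
  | nil => rfl
  | cons a t ih =>
      simp only [List.foldl_cons]
      rw [ih, PySem.Dict.getD_modify_self]

-- keys are unchanged by a fold of `modify` at keys that are already present
theorem pv_keys_foldl_modify {ν β : Type} (l : List β) (b : String) (d0 : ν) (f : ν → β → ν)
    (d : PySem.Dict String ν) (hb : b ∈ d.keys) :
    (l.foldl (fun g x => g.modify b d0 (fun s => f s x)) d).keys = d.keys := by
  induction l generalizing d with
  | nil => rfl
  | cons a t ih =>
      simp only [List.foldl_cons]
      have hc : d.contains b = true := (PySem.Dict.contains_iff_mem_keys d b).mpr hb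
      have hk : (d.modify b d0 (fun s => f s a)).keys = d.keys := by
        rw [PySem.Dict.keys_modify, PySem.Dict.keys_insert_of_contains _ _ hc]
      rw [ih _ (by rw [hk]; exact hb), hk]

theorem pv_update_self_of_subset {α : Type} [BEq α] [LawfulBEq α] (s : PySem.Set α) (xs : List α)
    (h : ∀ x ∈ xs, x ∈ s) : PySem.Set.update s xs = s := by
  rw [PySem.Set.update_eq_append_filter]
  have : List.filter (fun y => !s.contains y) (PySem.Set.ofList xs) = [] := by
    apply List.filter_eq_nil_iff.mpr
    intro a ha
    have hm : a ∈ s := h a ((PySem.Set.mem_ofList xs a).mp ha)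
    simpa using hm
  rw [this, List.append_nil]

-- A's per-block union-of-differences fold over the DEDUPLICATED variable set equals
-- the flat list of all contributions of the (duplicate-containing) variable list, as a set
theorem pv_fold_union_ofList (g : String → List String) (vars : List String) :
    (PySem.Set.ofList vars).foldl (fun k v => PySem.Set.update k (g v)) PySem.Set.empty
      = PySem.Set.ofList (vars.flatMap g) := by
  induction vars using List.reverseRecOn with
  | nil => rfl
  | append_singleton vs v ih =>
      rw [PySem.Set.ofList_append_singleton, List.flatMap_append, List.flatMap_singleton]
      by_cases hv : v ∈ PySem.Set.ofList vs
      · rw [PySem.Set.add_of_mem hv, ih, PySem.Set.ofList_append]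
        exact (pv_update_self_of_subset _ _ (fun x hx => by
          rw [PySem.Set.mem_ofList]
          exact List.mem_flatMap.mpr ⟨v, (PySem.Set.mem_ofList vs v).mp hv, hx⟩)).symm
      · rw [PySem.Set.add_of_not_mem hv, List.foldl_append, List.foldl_cons, List.foldl_nil, ih,
          PySem.Set.ofList_append]

-- the variable list of a block is the first projection of its definition table
theorem pv_vars_eq (b : String) (instrs : List (List (String × String))) (s0 : Int) :
    ((PySem.List.enumerate instrs s0).filterMap
        (fun ii => (pvDest ii.2).map (fun v => (v, pvMkDef b v ii.1)))).map Prod.fst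
      = instrs.filterMap pvDest := by
  induction instrs generalizing s0 with
  | nil => simp [PySem.List.enumerate_nil]
  | cons x xs ih =>
      rw [PySem.List.enumerate_cons]
      simp only [List.filterMap_cons]
      cases h : pvDest x with
      | none => simp [ih]
      | some v => simp [ih]

-- a block fold of modifies at other block names leaves a key's entry unchanged
theorem pv_getD_blockfold_ne (t : List (String × List (List (String × String))))
    (d : PySem.Dict String (PySem.Set String)) (k : String) (hne : ∀ bp ∈ t, bp.1 ≠ k) :
    (t.foldl (fun g bp => (pvDefsOf bp.1 bp.2).foldl
        (fun g vd => g.modify bp.1 PySem.Set.empty (fun s => s.add vd.2)) g) d).getD k PySem.Set.empty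
      = d.getD k PySem.Set.empty := by
  induction t generalizing d with
  | nil => rfl
  | cons r u ihu =>
      simp only [List.foldl_cons]
      rw [ihu _ (fun bp hbp => hne bp (List.mem_cons_of_mem _ hbp)),
        pv_getD_foldl_modify_ne _ _ _ _ _ _ (fun h => hne r List.mem_cons_self h.symm)]

-- pointwise value of A's gen after the first pass
theorem pv_getD_genfold (bs : List (String × List (List (String × String))))
    (d : PySem.Dict String (PySem.Set String)) (p : String × List (List (String × String)))
    (hnd : (bs.map Prod.fst).Nodup) (hp : p ∈ bs) :
    (bs.foldl (fun g bp => (pvDefsOf bp.1 bp.2).foldl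
        (fun g vd => g.modify bp.1 PySem.Set.empty (fun s => s.add vd.2)) g) d).getD p.1 PySem.Set.empty
      = (pvDefsOf p.1 p.2).foldl (fun s vd => s.add vd.2) (d.getD p.1 PySem.Set.empty) := by
  induction bs generalizing d with
  | nil => cases hp
  | cons q t ih =>
      simp only [List.map_cons, List.nodup_cons] at hnd
      simp only [List.foldl_cons]
      rcases List.mem_cons.mp hp with rfl | hpt
      · rw [pv_getD_blockfold_ne _ _ _ (fun bp hbp hk =>
          hnd.1 (by rw [← hk]; exact List.mem_map_of_mem hbp)), pv_getD_foldl_modify_self]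
      · rw [ih _ hnd.2 hpt,
          pv_getD_foldl_modify_ne _ _ _ _ _ _ (fun h => hnd.1 (by rw [← h]; exact List.mem_map_of_mem hpt))]

theorem pv_items_init {β ν : Type} (l : List β) (key : β → String) (F : β → ν)
    (hnd : (l.map key).Nodup) :
    (l.foldl (fun d p => d.insert (key p) (F p)) PySem.Dict.empty).items
      = l.map (fun p => (key p, F p)) := by
  simpa using PySem.Dict.items_foldl_insert_fresh l key F PySem.Dict.empty
    (fun a _ => PySem.Dict.contains_empty _) hnd

theorem pv_fold_add_eq (L : List (String × String)) :
    L.foldl (fun s vd => s.add vd.2) PySem.Set.empty = PySem.Set.ofList (L.map Prod.snd) := by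
  rw [show PySem.Set.ofList (L.map Prod.snd)
      = (L.map Prod.snd).foldl PySem.Set.add PySem.Set.empty from rfl, List.foldl_map]

theorem pv_vars_eq' (b : String) (instrs : List (List (String × String))) :
    instrs.filterMap pvDest = (pvDefsOf b instrs).map Prod.fst :=
  (pv_vars_eq b instrs 0).symm

theorem pv_keys_blockfold (bs : List (String × List (List (String × String))))
    (d : PySem.Dict String (PySem.Set String)) (h : ∀ bp ∈ bs, bp.1 ∈ d.keys) :
    (bs.foldl (fun g bp => (pvDefsOf bp.1 bp.2).foldl
        (fun g vd => g.modify bp.1 PySem.Set.empty (fun s => s.add vd.2)) g) d).keys = d.keys := by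
  induction bs generalizing d with
  | nil => rfl
  | cons q t ih =>
      simp only [List.foldl_cons]
      have hq : (((pvDefsOf q.1 q.2).foldl
          (fun g vd => g.modify q.1 PySem.Set.empty (fun s => s.add vd.2)) d)).keys = d.keys :=
        pv_keys_foldl_modify _ _ _ _ _ (h q List.mem_cons_self)
      rw [ih _ (fun bp hbp => by rw [hq]; exact h bp (List.mem_cons_of_mem _ hbp)), hq]

-- canonical values both ports are reduced to
def pvDbv (blocks : List (String × List (List (String × String)))) : PySem.Dict String (PySem.Set String) :=
  blocks.foldl (fun d bp => (pvDefsOf bp.1 bp.2).foldl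
    (fun d vd => d.modify vd.1 PySem.Set.empty (fun s => s.add vd.2)) d) PySem.Dict.empty

def pvS (p : String × List (List (String × String))) : PySem.Set String :=
  PySem.Set.ofList ((pvDefsOf p.1 p.2).map Prod.snd)

def pvKill (blocks : List (String × List (List (String × String))))
    (p : String × List (List (String × String))) : PySem.Set String :=
  PySem.Set.ofList (((pvDefsOf p.1 p.2).map Prod.fst).flatMap (fun v =>
    ((pvDbv blocks).getD v PySem.Set.empty).filter (fun x => !(PySem.Set.contains (pvS p) x))))

def pvAll (blocks : List (String × List (List (String × String)))) : PySem.Set String :=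
  blocks.foldl (fun s bp => (pvDefsOf bp.1 bp.2).foldl (fun s vd => s.add vd.2) s) PySem.Set.empty

-- named intermediate values of port A
def pvInit (blocks : List (String × List (List (String × String)))) : PySem.Dict String (PySem.Set String) :=
  blocks.foldl (fun d p => d.insert p.1 PySem.Set.empty) PySem.Dict.empty

def pvGenA (blocks : List (String × List (List (String × String)))) : PySem.Dict String (PySem.Set String) :=
  blocks.foldl (fun g bp => (PySem.List.enumerate bp.2).foldl (pvStepGen bp.1) g) (pvInit blocks)

def pvAllA (blocks : List (String × List (List (String × String)))) : PySem.Set String :=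
  blocks.foldl (fun s bp => (PySem.List.enumerate bp.2).foldl (pvStepAll bp.1) s) PySem.Set.empty

def pvDbvA (blocks : List (String × List (List (String × String)))) : PySem.Dict String (PySem.Set String) :=
  blocks.foldl (fun d bp => (PySem.List.enumerate bp.2).foldl (pvStepDbv bp.1) d) PySem.Dict.empty

def pvKillA (blocks : List (String × List (List (String × String)))) : PySem.Dict String (PySem.Set String) :=
  blocks.foldl (fun kd bp => kd.insert bp.1
    ((PySem.Set.ofList (bp.2.filterMap pvDest)).foldl (fun k v =>
      PySem.Set.union k (PySem.Set.diff ((pvDbvA blocks).getD v PySem.Set.empty)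
        ((pvGenA blocks).getD bp.1 PySem.Set.empty))) PySem.Set.empty)) (pvInit blocks)

theorem pv_A_eq (blocks : List (String × List (List (String × String)))) :
    collect_defs blocks = ((pvGenA blocks).items, (pvKillA blocks).items, pvAllA blocks) := by
  unfold collect_defs pvKillA pvGenA pvAllA pvDbvA pvInit
  dsimp only []
  rw [pv_pass1_split]

-- ===== port A: items of the three results =====
theorem pv_genA_fold (blocks : List (String × List (List (String × String)))) :
    pvGenA blocks = blocks.foldl (fun g bp => (pvDefsOf bp.1 bp.2).foldl
      (fun g vd => g.modify bp.1 PySem.Set.empty (fun s => s.add vd.2)) g) (pvInit blocks) := by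
  unfold pvGenA
  simp only [pv_stepGen_eq]
  rfl

theorem pv_dbvA_eq (blocks : List (String × List (List (String × String)))) :
    pvDbvA blocks = pvDbv blocks := by
  unfold pvDbvA pvDbv
  simp only [pv_stepDbv_eq]
  rfl

theorem pv_allA_eq (blocks : List (String × List (List (String × String)))) :
    pvAllA blocks = pvAll blocks := by
  unfold pvAllA pvAll
  simp only [pv_stepAll_eq]
  rfl

theorem pv_init_items (blocks : List (String × List (List (String × String))))
    (hnd : (blocks.map Prod.fst).Nodup) :
    (pvInit blocks).items = blocks.map (fun p => (p.1, (PySem.Set.empty : PySem.Set String))) :=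
  pv_items_init blocks Prod.fst (fun _ => PySem.Set.empty) hnd

theorem pv_init_keys (blocks : List (String × List (List (String × String))))
    (hnd : (blocks.map Prod.fst).Nodup) :
    (pvInit blocks).keys = blocks.map Prod.fst := by
  simp [PySem.Dict.keys, pv_init_items blocks hnd, List.map_map, Function.comp_def]

theorem pv_init_getD (blocks : List (String × List (List (String × String))))
    (hnd : (blocks.map Prod.fst).Nodup) (p : String × List (List (String × String))) (hp : p ∈ blocks) :
    (pvInit blocks).getD p.1 PySem.Set.empty = PySem.Set.empty := by
  apply PySem.Dict.getD_of_mem_items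
  · rw [pv_init_items blocks hnd]
    exact List.mem_map_of_mem hp
  · rw [pv_init_keys blocks hnd]; exact hnd

theorem pv_genA_getD (blocks : List (String × List (List (String × String))))
    (hnd : (blocks.map Prod.fst).Nodup) (p : String × List (List (String × String))) (hp : p ∈ blocks) :
    (pvGenA blocks).getD p.1 PySem.Set.empty = pvS p := by
  rw [pv_genA_fold, pv_getD_genfold blocks _ p hnd hp, pv_init_getD blocks hnd p hp,
    pv_fold_add_eq]
  rfl

theorem pv_genA_keys (blocks : List (String × List (List (String × String))))
    (hnd : (blocks.map Prod.fst).Nodup) :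
    (pvGenA blocks).keys = blocks.map Prod.fst := by
  rw [pv_genA_fold, pv_keys_blockfold _ _ (fun bp hbp => by
      rw [pv_init_keys blocks hnd]; exact List.mem_map_of_mem hbp),
    pv_init_keys blocks hnd]

theorem pv_genA_items (blocks : List (String × List (List (String × String))))
    (hnd : (blocks.map Prod.fst).Nodup) :
    (pvGenA blocks).items = blocks.map (fun p => (p.1, pvS p)) := by
  rw [PySem.Dict.items_eq_map_keys _ (by rw [pv_genA_keys blocks hnd]; exact hnd) PySem.Set.empty,
    pv_genA_keys blocks hnd, List.map_map]
  exact List.map_congr_left (fun p hp => by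
    simp only [Function.comp_apply]
    rw [pv_genA_getD blocks hnd p hp])

theorem pv_killA_items (blocks : List (String × List (List (String × String))))
    (hnd : (blocks.map Prod.fst).Nodup) :
    (pvKillA blocks).items = blocks.map (fun p => (p.1, pvKill blocks p)) := by
  have hkeys : (pvKillA blocks).keys = blocks.map Prod.fst := by
    unfold pvKillA
    rw [PySem.Dict.keys_foldl_insert_key blocks Prod.fst _ (pvInit blocks),
      pv_init_keys blocks hnd,
      pv_update_self_of_subset _ _ (fun x hx => hx)]
  rw [PySem.Dict.items_eq_map_keys _ (by rw [hkeys]; exact hnd) PySem.Set.empty,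
    hkeys, List.map_map]
  refine List.map_congr_left (fun p hp => ?_)
  simp only [Function.comp_apply]
  have hgd : (pvKillA blocks).getD p.1 PySem.Set.empty
      = (PySem.Set.ofList (p.2.filterMap pvDest)).foldl (fun k v =>
          PySem.Set.union k (PySem.Set.diff ((pvDbvA blocks).getD v PySem.Set.empty)
            ((pvGenA blocks).getD p.1 PySem.Set.empty))) PySem.Set.empty := by
    unfold pvKillA
    exact pv_getD_foldl_insert_indep blocks Prod.fst _ (pvInit blocks) p PySem.Set.empty hnd hp
  rw [hgd, pv_genA_getD blocks hnd p hp, pv_dbvA_eq, pv_vars_eq' p.1 p.2]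
  simp only [PySem.Set.union, PySem.Set.diff]
  rw [pv_fold_union_ofList (fun v => ((pvDbv blocks).getD v PySem.Set.empty).filter
      (fun x => !(PySem.Set.contains (pvS p) x)))]
  rfl

theorem pv_A_norm (blocks : List (String × List (List (String × String))))
    (hnd : (blocks.map Prod.fst).Nodup) :
    collect_defs blocks =
      (blocks.map (fun p => (p.1, pvS p)),
       blocks.map (fun p => (p.1, pvKill blocks p)),
       pvAll blocks) := by
  rw [pv_A_eq, pv_genA_items blocks hnd, pv_killA_items blocks hnd, pv_allA_eq]

-- ===== port B: normalization =====
-- B's flat triple list and its canonical form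
def pvTriP (blocks : List (String × List (List (String × String)))) : List (String × String × String) :=
  blocks.flatMap (fun bp => (PySem.List.enumerate bp.2).filterMap
    (fun ii => (pvDest ii.2).map (fun v => (v, bp.1, pvMkDef bp.1 v ii.1))))

def pvGenB (blocks : List (String × List (List (String × String)))) : PySem.Dict String (PySem.Set String) :=
  blocks.foldl (fun d bp => d.insert bp.1
    (PySem.Set.ofList (((pvTriP blocks).filter (fun t => t.2.1 == bp.1)).map (fun t => t.2.2)))) PySem.Dict.empty

def pvKillB (blocks : List (String × List (List (String × String)))) : PySem.Dict String (PySem.Set String) :=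
  blocks.foldl (fun d bp => d.insert bp.1
    (PySem.Set.ofList
      ((PySem.Set.ofList (((pvTriP blocks).filter (fun t => t.2.1 == bp.1)).map (fun t => t.1))).flatMap
        (fun v => ((pvTriP blocks).filter (fun t => t.1 == v &&
            !(PySem.Set.contains ((pvGenB blocks).getD bp.1 PySem.Set.empty) t.2.2))).map (fun t => t.2.2)))))
    PySem.Dict.empty

theorem pv_B_eq (blocks : List (String × List (List (String × String)))) :
    collect_defs_alt blocks = ((pvGenB blocks).items, (pvKillB blocks).items,
      PySem.Set.ofList ((pvTriP blocks).map (fun t => t.2.2))) := rfl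

-- the triple list is the per-block definition tables with the origin inserted
theorem pv_triP_eq (blocks : List (String × List (List (String × String)))) :
    pvTriP blocks = blocks.flatMap (fun bp => (pvDefsOf bp.1 bp.2).map (fun vd => (vd.1, bp.1, vd.2))) := by
  unfold pvTriP pvDefsOf
  refine List.flatMap_congr ?_
  intro bp _
  rw [List.map_filterMap]
  simp only [Option.map_map]
  rfl

-- the (var, def) pairs of all blocks, flat and in order
def pvPairs (blocks : List (String × List (List (String × String)))) : List (String × String) :=
  blocks.flatMap (fun bp => pvDefsOf bp.1 bp.2)

-- the triples restricted to a block (nodup names) are that block's pairs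
theorem pv_filter_origin (blocks : List (String × List (List (String × String))))
    (hnd : (blocks.map Prod.fst).Nodup) (p : String × List (List (String × String))) (hp : p ∈ blocks) :
    (pvTriP blocks).filter (fun t => t.2.1 == p.1)
      = (pvDefsOf p.1 p.2).map (fun vd => (vd.1, p.1, vd.2)) := by
  rw [pv_triP_eq, List.filter_flatMap]
  induction blocks with
  | nil => cases hp
  | cons q t ih =>
      simp only [List.map_cons, List.nodup_cons] at hnd
      rw [List.flatMap_cons]
      rcases List.mem_cons.mp hp with rfl | hpt
      · have h1 : ((pvDefsOf p.1 p.2).map (fun vd => (vd.1, p.1, vd.2))).filter (fun t => t.2.1 == p.1)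
            = (pvDefsOf p.1 p.2).map (fun vd => (vd.1, p.1, vd.2)) := by
          apply List.filter_eq_self.mpr
          intro a ha
          rcases List.mem_map.mp ha with ⟨vd, _, rfl⟩
          simp
        have h2 : t.flatMap (fun bp => (((pvDefsOf bp.1 bp.2).map (fun vd => (vd.1, bp.1, vd.2))).filter (fun tr => tr.2.1 == p.1))) = [] := by
          apply List.flatMap_eq_nil_iff.mpr
          intro bp hbp
          apply List.filter_eq_nil_iff.mpr
          intro a ha
          rcases List.mem_map.mp ha with ⟨vd, _, rfl⟩
          simp only [beq_iff_eq]
          exact fun h => hnd.1 (by rw [← h]; exact List.mem_map_of_mem hbp)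
        rw [h1, h2, List.append_nil]
      · have h1 : ((pvDefsOf q.1 q.2).map (fun vd => (vd.1, q.1, vd.2))).filter (fun t => t.2.1 == p.1) = [] := by
          apply List.filter_eq_nil_iff.mpr
          intro a ha
          rcases List.mem_map.mp ha with ⟨vd, _, rfl⟩
          simp only [beq_iff_eq]
          exact fun h => hnd.1 (by rw [h]; exact List.mem_map_of_mem hpt)
        rw [h1, List.nil_append]
        exact ih hnd.2 hpt

-- projections of the restricted triples
theorem pv_triP_block_defs (blocks : List (String × List (List (String × String))))
    (hnd : (blocks.map Prod.fst).Nodup) (p : String × List (List (String × String))) (hp : p ∈ blocks) :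
    ((pvTriP blocks).filter (fun t => t.2.1 == p.1)).map (fun t => t.2.2)
      = (pvDefsOf p.1 p.2).map Prod.snd := by
  rw [pv_filter_origin blocks hnd p hp, List.map_map]; rfl

theorem pv_triP_block_vars (blocks : List (String × List (List (String × String))))
    (hnd : (blocks.map Prod.fst).Nodup) (p : String × List (List (String × String))) (hp : p ∈ blocks) :
    ((pvTriP blocks).filter (fun t => t.2.1 == p.1)).map (fun t => t.1)
      = (pvDefsOf p.1 p.2).map Prod.fst := by
  rw [pv_filter_origin blocks hnd p hp, List.map_map]; rfl

-- gen of port B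
theorem pv_genB_items (blocks : List (String × List (List (String × String))))
    (hnd : (blocks.map Prod.fst).Nodup) :
    (pvGenB blocks).items = blocks.map (fun p => (p.1, pvS p)) := by
  unfold pvGenB
  rw [pv_items_init blocks Prod.fst _ hnd]
  exact List.map_congr_left (fun p hp => by
    rw [pv_triP_block_defs blocks hnd p hp]; rfl)

theorem pv_genB_getD (blocks : List (String × List (List (String × String))))
    (hnd : (blocks.map Prod.fst).Nodup) (p : String × List (List (String × String))) (hp : p ∈ blocks) :
    (pvGenB blocks).getD p.1 PySem.Set.empty = pvS p := by
  apply PySem.Dict.getD_of_mem_items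
  · rw [pv_genB_items blocks hnd]
    exact List.mem_map_of_mem hp
  · show ((pvGenB blocks).items.map Prod.fst).Nodup
    rw [pv_genB_items blocks hnd]
    simpa [List.map_map, Function.comp_def] using hnd

-- triples projected through a variable filter are the pairs so filtered
theorem pv_triP_var_filter (blocks : List (String × List (List (String × String)))) (q : String × String × String → Bool)
    (q' : String × String → Bool) (hq : ∀ (v b d : String), q (v, b, d) = q' (v, d)) :
    ((pvTriP blocks).filter q).map (fun t => t.2.2)
      = ((pvPairs blocks).filter q').map Prod.snd := by
  rw [pv_triP_eq]
  unfold pvPairs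
  rw [List.filter_flatMap, List.filter_flatMap, List.map_flatMap, List.map_flatMap]
  refine List.flatMap_congr ?_
  intro bp _
  rw [List.filter_map, List.map_map]
  have : (q ∘ fun vd => (vd.1, bp.1, vd.2)) = q' := by
    funext vd; exact hq vd.1 bp.1 vd.2
  rw [this]
  rfl

-- dbv flattened, and its pointwise value
theorem pv_getD_foldl_modify_key {β : Type} (l : List β) (key : β → String) (val : β → String)
    (d : PySem.Dict String (PySem.Set String)) (k : String) :
    (l.foldl (fun d vd => d.modify (key vd) PySem.Set.empty (fun s => s.add (val vd))) d).getD k PySem.Set.empty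
      = ((l.filter (fun vd => key vd == k)).map val).foldl PySem.Set.add (d.getD k PySem.Set.empty) := by
  induction l generalizing d with
  | nil => rfl
  | cons a t ih =>
      simp only [List.foldl_cons, List.filter_cons]
      by_cases h : key a = k
      · subst h
        simp only [beq_self_eq_true, if_pos, List.map_cons, List.foldl_cons]
        rw [ih, PySem.Dict.getD_modify_self]
      · have : (key a == k) = false := beq_eq_false_iff_ne.mpr h
        simp only [this, Bool.false_eq_true, if_neg, not_false_iff]
        rw [ih, PySem.Dict.getD_modify, if_neg (fun hk => h hk.symm)]

theorem pv_dbv_getD (blocks : List (String × List (List (String × String)))) (v : String) :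
    (pvDbv blocks).getD v PySem.Set.empty
      = PySem.Set.ofList (((pvPairs blocks).filter (fun vd => vd.1 == v)).map Prod.snd) := by
  unfold pvDbv pvPairs
  rw [← List.foldl_flatMap]
  rw [pv_getD_foldl_modify_key (blocks.flatMap (fun bp => pvDefsOf bp.1 bp.2)) Prod.fst Prod.snd PySem.Dict.empty v]
  rfl

-- set(filter) commutes with filtering the dedup list
theorem pv_ofList_filter {α : Type} [BEq α] [LawfulBEq α] (L : List α) (q : α → Bool) :
    (PySem.Set.ofList L).filter q = PySem.Set.ofList (L.filter q) := by
  induction L using List.reverseRecOn with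
  | nil => rfl
  | append_singleton xs x ih =>
      rw [PySem.Set.ofList_append_singleton, List.filter_append, PySem.Set.ofList_append]
      by_cases hx : x ∈ PySem.Set.ofList xs
      · rw [PySem.Set.add_of_mem hx]
        cases hq : q x
        · simp only [List.filter_cons, hq, Bool.false_eq_true, if_neg, not_false_iff, List.filter_nil]
          rw [PySem.Set.update_nil]
          exact ih
        · simp only [List.filter_cons, hq, if_pos, List.filter_nil]
          rw [ih, PySem.Set.update_cons, PySem.Set.update_nil,
            PySem.Set.add_of_mem (by
              rw [PySem.Set.mem_ofList, List.mem_filter]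
              exact ⟨(PySem.Set.mem_ofList xs x).mp hx, hq⟩)]
      · rw [PySem.Set.add_of_not_mem hx, List.filter_append]
        cases hq : q x
        · simp only [List.filter_cons, hq, Bool.false_eq_true, if_neg, not_false_iff, List.filter_nil]
          rw [List.append_nil, PySem.Set.update_nil]
          exact ih
        · simp only [List.filter_cons, hq, if_pos, List.filter_nil]
          rw [PySem.Set.update_cons, PySem.Set.update_nil, ih,
            PySem.Set.add_of_not_mem (by
              rw [PySem.Set.mem_ofList, List.mem_filter]
              exact fun h => hx ((PySem.Set.mem_ofList xs x).mpr h.1))]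

-- updating with a set's elements is updating with the underlying list
theorem pv_update_ofList {α : Type} [BEq α] [LawfulBEq α] (s : PySem.Set α) (xs : List α) :
    PySem.Set.update s (PySem.Set.ofList xs) = PySem.Set.update s xs := by
  rw [PySem.Set.update_eq_append_filter, PySem.Set.update_eq_append_filter, PySem.Set.ofList_ofList]

-- dedup of the iterated list does not change the resulting set
theorem pv_ofList_flatMap_ofList (vars : List String) (h : String → List String) :
    PySem.Set.ofList ((PySem.Set.ofList vars).flatMap h)
      = PySem.Set.ofList (vars.flatMap (fun v => PySem.Set.ofList (h v))) := by
  have h1 : PySem.Set.ofList ((PySem.Set.ofList vars).flatMap h)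
      = (PySem.Set.ofList vars).foldl (fun k v => PySem.Set.update k (h v)) PySem.Set.empty := by
    rw [← pv_fold_union_ofList h (PySem.Set.ofList vars), PySem.Set.ofList_ofList]
  have h2 : (PySem.Set.ofList vars).foldl (fun k v => PySem.Set.update k (h v)) PySem.Set.empty
      = (PySem.Set.ofList vars).foldl (fun k v => PySem.Set.update k (PySem.Set.ofList (h v))) PySem.Set.empty := by
    have : (fun (k : PySem.Set String) v => PySem.Set.update k (h v))
        = (fun k v => PySem.Set.update k (PySem.Set.ofList (h v))) := by
      funext k v; rw [pv_update_ofList]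
    rw [this]
  rw [h1, h2, pv_fold_union_ofList]

-- kill of port B
theorem pv_killB_items (blocks : List (String × List (List (String × String))))
    (hnd : (blocks.map Prod.fst).Nodup) :
    (pvKillB blocks).items = blocks.map (fun p => (p.1, pvKill blocks p)) := by
  unfold pvKillB
  rw [pv_items_init blocks Prod.fst _ hnd]
  refine List.map_congr_left (fun p hp => ?_)
  rw [pv_triP_block_vars blocks hnd p hp, pv_genB_getD blocks hnd p hp]
  unfold pvKill
  -- the inner comprehension for one variable, as a filter of the canonical pair list
  have hin : (fun v => ((pvTriP blocks).filter (fun t => t.1 == v &&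
        !(PySem.Set.contains (pvS p) t.2.2))).map (fun t => t.2.2))
      = (fun v => ((pvPairs blocks).filter (fun vd => vd.1 == v &&
        !(PySem.Set.contains (pvS p) vd.2))).map Prod.snd) := by
    funext v
    exact pv_triP_var_filter blocks _ _ (fun _ _ _ => rfl)
  rw [hin]
  -- A's per-variable contribution is the set of B's
  have hA : (fun v => ((pvDbv blocks).getD v PySem.Set.empty).filter
        (fun x => !(PySem.Set.contains (pvS p) x)))
      = (fun v => PySem.Set.ofList (((pvPairs blocks).filter (fun vd => vd.1 == v &&
        !(PySem.Set.contains (pvS p) vd.2))).map Prod.snd)) := by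
    funext v
    rw [pv_dbv_getD blocks v, pv_ofList_filter, List.filter_map, List.filter_filter]
    have hpred : (fun (a : String × String) => ((fun x => !(PySem.Set.contains (pvS p) x)) ∘ Prod.snd) a && a.1 == v)
        = (fun (vd : String × String) => vd.1 == v && !(PySem.Set.contains (pvS p) vd.2)) := by
      funext a
      simp [Function.comp, Bool.and_comm]
    rw [hpred]
  rw [hA, ← pv_ofList_flatMap_ofList]

-- all_defs of port B
theorem pv_allB_eq (blocks : List (String × List (List (String × String)))) :
    PySem.Set.ofList ((pvTriP blocks).map (fun t => t.2.2)) = pvAll blocks := by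
  have h1 : (pvTriP blocks).map (fun t => t.2.2) = (pvPairs blocks).map Prod.snd := by
    have := pv_triP_var_filter blocks (fun _ => true) (fun _ => true) (fun _ _ _ => rfl)
    simpa [List.filter_true] using this
  rw [h1,
    show PySem.Set.ofList ((pvPairs blocks).map Prod.snd)
      = ((pvPairs blocks).map Prod.snd).foldl PySem.Set.add PySem.Set.empty from rfl,
    List.foldl_map]
  unfold pvPairs pvAll
  rw [List.foldl_flatMap]

theorem pv_B_norm (blocks : List (String × List (List (String × String))))
    (hnd : (blocks.map Prod.fst).Nodup) :
    collect_defs_alt blocks =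
      (blocks.map (fun p => (p.1, pvS p)),
       blocks.map (fun p => (p.1, pvKill blocks p)),
       pvAll blocks) := by
  rw [pv_B_eq, pv_genB_items blocks hnd, pv_killB_items blocks hnd, pv_allB_eq blocks]

-- ===== VERDICT (by name: the statement is the Claim_ definition above) =====
theorem collect_defs_spec : Claim_equal_collect_defs := by
  intro blocks _ hpre
  unfold Spec_collect_defs
  rw [pv_A_norm blocks hpre, pv_B_norm blocks hpre]
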